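-- pv_equiv track=rewrite | github.com/Anavros/keymap | count.py | complete
-- ===== SOURCE A (Python) =====
-- from string import ascii_lowercase
--
-- def complete(keycounts):
--     """
--     Take a {key: count} dictionary and fill in each key not already included
--     with a default value of 0. Used for showing the absence of keys in a count.
--     Creates a new dictionary to return.
--     """
--     new = {}
--     for alpha in ascii_lowercase:
--         try:
--             count = keycounts[alpha]
--         except KeyError:
--             new[alpha] = 0
--         else:
--             new[alpha] = count
--     return new
-- ===== SOURCE B (Python) =====
-- from string import ascii_lowercase
--
-- def complete(keycounts):
--     new = dict.fromkeys(ascii_lowercase, 0)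
--     for k, v in keycounts.items():
--         if k in new:
--             new[k] = v
--     return new
-- ===== Notes on version B (the rewrite author's own statement) =====
-- stated objective: simpler
-- what changed: B builds the full a..z default dict once with dict.fromkeys and then iterates over the INPUT dict, overwriting only keys already present, instead of A's loop over the alphabet with a try/except lookup per letter.
import Mathlib
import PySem

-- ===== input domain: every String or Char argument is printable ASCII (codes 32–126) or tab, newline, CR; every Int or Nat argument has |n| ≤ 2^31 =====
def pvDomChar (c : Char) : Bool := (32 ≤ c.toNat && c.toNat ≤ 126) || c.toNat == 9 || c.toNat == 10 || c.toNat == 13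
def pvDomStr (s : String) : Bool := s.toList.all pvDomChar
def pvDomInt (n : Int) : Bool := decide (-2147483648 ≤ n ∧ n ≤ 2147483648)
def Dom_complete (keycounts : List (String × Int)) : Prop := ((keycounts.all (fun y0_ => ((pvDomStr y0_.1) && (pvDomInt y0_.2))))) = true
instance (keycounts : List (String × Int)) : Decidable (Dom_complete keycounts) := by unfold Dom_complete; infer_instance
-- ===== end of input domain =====

-- B fills the result with dict.fromkeys(ascii_lowercase, 0) and then iterates the input dict,
-- overwriting the keys already present — simpler than A's per-letter try/except lookup.


-- ascii_lowercase iterated as one-character strings (Python dict keys are strings)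
def pvLetters : List String :=
  ["a","b","c","d","e","f","g","h","i","j","k","l","m",
   "n","o","p","q","r","s","t","u","v","w","x","y","z"]

-- ===== PORT A =====
def complete (keycounts : List (String × Int)) : List (String × Int) :=
  (pvLetters.foldl
    (fun (new : PySem.Dict String Int) alpha =>
      match (PySem.Dict.mk keycounts).get? alpha with   -- try: keycounts[alpha]
      | none => new.insert alpha 0                       -- except KeyError: new[alpha] = 0
      | some count => new.insert alpha count)            -- else: new[alpha] = count
    PySem.Dict.empty).items

-- ===== PORT B =====
-- dict.fromkeys(ascii_lowercase, 0)
def pvBase : PySem.Dict String Int :=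
  PySem.Dict.mk (pvLetters.map (fun a => (a, (0 : Int))))

def complete_alt (keycounts : List (String × Int)) : List (String × Int) :=
  (keycounts.foldl
    (fun (new : PySem.Dict String Int) p =>
      if new.contains p.1 then new.insert p.1 p.2 else new)   -- if k in new: new[k] = v
    pvBase).items

-- ===== PRECONDITION & SPEC =====
-- Pre_ excludes association lists with duplicate keys: a Python dict argument has no
-- duplicate keys, so such lists are ambiguous renderings (first-match vs last-overwrite).
def Pre_complete (keycounts : List (String × Int)) : Prop :=
  (keycounts.map (·.1)).Nodup
instance (keycounts : List (String × Int)) : Decidable (Pre_complete keycounts) := by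
  unfold Pre_complete; infer_instance

def pvWitness_complete : (List (String × Int)) := [("a", 3), ("!", 5), ("z", -1)]

def Spec_complete (keycounts : List (String × Int)) (out : List (String × Int)) : Prop := out = complete_alt keycounts
instance (keycounts : List (String × Int)) (out : List (String × Int)) : Decidable (Spec_complete keycounts out) := by unfold Spec_complete; infer_instance

-- ===== CLAIM (what is proved, stated in full; the proofs are below) =====
def Claim_equal_complete : Prop := ∀ (keycounts : List (String × Int)), Dom_complete keycounts → Pre_complete keycounts → Spec_complete keycounts (complete keycounts)

-- ===== LEMMAS AND PROOFS =====

-- A's loop inserts the 26 distinct fresh letters into an empty dict, so its items are a map.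
theorem complete_eq_map (kc : List (String × Int)) :
    complete kc = pvLetters.map
      (fun a => (a, (PySem.Dict.mk kc).getD a 0)) := by
  unfold complete
  have h := PySem.Dict.items_foldl_insert_fresh (l := pvLetters)
    (k := fun a => a)
    (v := fun a => match (PySem.Dict.mk kc).get? a with
                   | none => (0 : Int)
                   | some count => count)
    (d := PySem.Dict.empty)
    (by intro a _; exact PySem.Dict.contains_empty a)
    (by simpa using (by decide : pvLetters.Nodup))
  rw [show (fun (new : PySem.Dict String Int) alpha =>
        match (PySem.Dict.mk kc).get? alpha with
        | none => new.insert alpha 0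
        | some count => new.insert alpha count)
      = (fun (new : PySem.Dict String Int) alpha =>
        new.insert alpha (match (PySem.Dict.mk kc).get? alpha with
          | none => (0 : Int) | some count => count)) from by
        funext new alpha; cases (PySem.Dict.mk kc).get? alpha <;> rfl]
  rw [h]
  simp only [PySem.Dict.empty, List.nil_append]
  apply List.map_congr_left
  intro a _
  rw [PySem.Dict.getD_eq_get?_getD]
  cases (PySem.Dict.mk kc).get? a <;> rfl

-- B's loop never changes the key set.
theorem keys_foldB (kc : List (String × Int)) (d : PySem.Dict String Int) :
    (kc.foldl (fun new p => if new.contains p.1 then new.insert p.1 p.2 else new) d).keys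
      = d.keys := by
  induction kc generalizing d with
  | nil => rfl
  | cons p rest ih =>
    simp only [List.foldl_cons]
    rw [ih]
    by_cases h : d.contains p.1 = true
    · rw [if_pos h, PySem.Dict.keys_insert_of_contains _ _ h]
    · rw [if_neg h]

-- B's loop, on a duplicate-free list, looks up like the dict of that list where the key is present.
theorem get?_foldB (kc : List (String × Int)) (d : PySem.Dict String Int) (a : String)
    (hnd : (kc.map (·.1)).Nodup) :
    (kc.foldl (fun new p => if new.contains p.1 then new.insert p.1 p.2 else new) d).get? a
      = match (PySem.Dict.mk kc).get? a with
        | some v => if d.contains a then some v else d.get? a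
        | none => d.get? a := by
  induction kc generalizing d with
  | nil => rfl
  | cons p rest ih =>
    obtain ⟨k, v⟩ := p
    simp only [List.map_cons, List.nodup_cons] at hnd
    simp only [List.foldl_cons]
    rw [ih _ hnd.2]
    by_cases hak : a = k
    · subst hak
      have hrest : (PySem.Dict.mk rest).get? a = none := by
        rw [PySem.Dict.get?_eq_none_iff_not_mem_keys]
        simpa [PySem.Dict.keys, PySem.Dict.items] using hnd.1
      rw [hrest, PySem.Dict.get?_mk_cons]
      simp only [BEq.rfl, ↓reduceIte]
      by_cases h : d.contains a = true
      · rw [if_pos h, if_pos h, PySem.Dict.get?_insert_self]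
      · rw [if_neg h, if_neg h]
    · have hc : (if d.contains k = true then d.insert k v else d).contains a
          = d.contains a := by
        by_cases h : d.contains k = true
        · rw [if_pos h, PySem.Dict.contains_insert]
          simp [hak]
        · rw [if_neg h]
      have hget : (if d.contains k = true then d.insert k v else d).get? a = d.get? a := by
        by_cases h : d.contains k = true
        · rw [if_pos h, PySem.Dict.get?_insert_of_ne _ _ hak]
        · rw [if_neg h]
      have hne : (k == a) = false := by simp; exact fun h => hak h.symm
      rw [PySem.Dict.get?_mk_cons, hne, hc, hget]
      simp only [Bool.false_eq_true, ↓reduceIte]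

theorem base_get? (a : String) (ha : a ∈ pvLetters) : pvBase.get? a = some 0 := by
  apply PySem.Dict.get?_of_mem_items
  · simp only [pvBase]
    exact List.mem_map.mpr ⟨a, ha, rfl⟩
  · decide

theorem base_contains (a : String) (ha : a ∈ pvLetters) : pvBase.contains a = true := by
  rw [PySem.Dict.contains_eq_isSome_get?, base_get? a ha]; rfl

theorem complete_alt_eq_map (kc : List (String × Int)) (hnd : (kc.map (·.1)).Nodup) :
    complete_alt kc = pvLetters.map
      (fun a => (a, (PySem.Dict.mk kc).getD a 0)) := by
  unfold complete_alt
  set R := kc.foldl (fun new p => if new.contains p.1 then new.insert p.1 p.2 else new) pvBase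
    with hR
  have hkeys : R.keys = pvLetters := by
    rw [hR, keys_foldB]; decide
  have hnodup : R.keys.Nodup := by rw [hkeys]; decide
  rw [PySem.Dict.items_eq_map_keys R hnodup 0, hkeys]
  apply List.map_congr_left
  intro a ha
  have := get?_foldB kc pvBase a hnd
  rw [← hR] at this
  rw [PySem.Dict.getD_eq_get?_getD, this, PySem.Dict.getD_eq_get?_getD]
  cases h : (PySem.Dict.mk kc).get? a with
  | none => simp only [base_get? a ha]; rfl
  | some v => simp only [if_pos (base_contains a ha)]

-- ===== VERDICT (by name: the statement is the Claim_ definition above) =====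
theorem complete_spec : Claim_equal_complete := by
  intro kc _ hpre
  unfold Spec_complete
  rw [complete_eq_map, complete_alt_eq_map kc hpre]
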